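-- pv_equiv track=rewrite | github.com/Simon-Lee-UK/blackjack-game | blackjack/hand.py | _calculate_ace_values
-- ===== SOURCE A (Python) =====
-- def _calculate_ace_values(ace_count, ace_values):
--     """
--     Returns the possible values of a collection of ace cards as a sorted list.
--
--     Parameters
--     ----------
--     ace_count : int
--         The number of ace cards to calculate possible summed values for.
--     ace_values : tuple
--         A two-element tuple containing the possible card values an ace can take e.g. (1, 11).
--
--     Returns
--     -------
--     ace_sum_possibilities : list of int
--         A list containing each value 'ace_count' number of aces can combine to make.
--
--     TODO: Refactor to allow any number of possible ace values (additional loop over keys of dict?)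
--     """
--     ace_sum_possibilities = [0]
--     for ace_idx in range(ace_count):
--         first_set = [
--             ace_values[0] + ace_sum_element
--             for ace_sum_element in ace_sum_possibilities
--         ]
--         second_set = [
--             ace_values[1] + ace_sum_element
--             for ace_sum_element in ace_sum_possibilities
--         ]
--         ace_sum_possibilities = list(set(first_set + second_set))
--         ace_sum_possibilities.sort()
--     return ace_sum_possibilities
-- ===== SOURCE B (Python) =====
-- def _calculate_ace_values(ace_count, ace_values):
--     """Closed form: with k aces at ace_values[0] and the rest at ace_values[1],
--     the possible totals are exactly {v0*k + v1*(n-k) : 0 <= k <= n}."""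
--     if ace_count <= 0:
--         return [0]
--     v0, v1 = ace_values[0], ace_values[1]
--     return sorted({v0 * k + v1 * (ace_count - k) for k in range(ace_count + 1)})
-- ===== Notes on version B (the rewrite author's own statement) =====
-- stated objective: faster
-- what changed: Replaces the loop that rebuilds, dedupes and re-sorts the whole possibility list once per ace with a one-shot closed form: the achievable totals are exactly v0*k + v1*(n-k) for k = 0..n, computed, deduped and sorted once.
import Mathlib
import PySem

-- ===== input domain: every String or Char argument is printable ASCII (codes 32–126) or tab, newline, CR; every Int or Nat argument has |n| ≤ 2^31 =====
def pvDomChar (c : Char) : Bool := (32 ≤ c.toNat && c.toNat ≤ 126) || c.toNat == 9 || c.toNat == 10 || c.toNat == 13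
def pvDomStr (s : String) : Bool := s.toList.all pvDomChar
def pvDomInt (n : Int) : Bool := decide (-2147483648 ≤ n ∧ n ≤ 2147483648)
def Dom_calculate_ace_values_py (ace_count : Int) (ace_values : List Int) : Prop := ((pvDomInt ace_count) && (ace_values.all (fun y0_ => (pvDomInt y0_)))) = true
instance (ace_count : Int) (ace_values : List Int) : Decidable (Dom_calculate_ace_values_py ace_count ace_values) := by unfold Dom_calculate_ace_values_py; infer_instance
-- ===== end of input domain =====

-- B computes the reachable totals in closed form (v0*k + v1*(n-k) for k = 0..n) in one
-- pass instead of A's per-ace rebuild/dedup/re-sort loop; return values agree on Pre_.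

-- ===== PORT A =====
-- Python's `list(set(...))` has unspecified (hash) order, but A sorts it immediately;
-- sorting the first-occurrence dedup (Set.ofList) yields the same sorted value.
def calculate_ace_values_py (ace_count : Int) (ace_values : List Int) : List Int :=
  (PySem.List.pyRange 0 ace_count 1).foldl
    (fun acc _ =>
      match PySem.List.pyGet? ace_values 0, PySem.List.pyGet? ace_values 1 with
      | some v0, some v1 =>
          PySem.List.sorted
            (PySem.Set.ofList (acc.map (fun e => v0 + e) ++ acc.map (fun e => v1 + e)))
            (fun x => x) false
      | _, _ => [])   -- IndexError in Python: excluded by Pre_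
    [0]

-- ===== PORT B =====
def calculate_ace_values_py_alt (ace_count : Int) (ace_values : List Int) : List Int :=
  if ace_count ≤ 0 then [0]
  else
    match PySem.List.pyGet? ace_values 0 with
    | none => []   -- IndexError in Python: excluded by Pre_
    | some v0 =>
      match PySem.List.pyGet? ace_values 1 with
      | none => []   -- IndexError in Python: excluded by Pre_
      | some v1 =>
        PySem.List.sorted
          (PySem.Set.ofList ((PySem.List.pyRange 0 (ace_count + 1) 1).map
            (fun k => v0 * k + v1 * (ace_count - k))))
          (fun x => x) false

-- ===== PRECONDITION & SPEC =====
-- Pre_ excludes exactly the inputs where Python A raises IndexError: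
-- a positive ace_count with fewer than two ace_values (A reads ace_values[0] and [1]).
def Pre_calculate_ace_values_py (ace_count : Int) (ace_values : List Int) : Prop :=
  ace_count ≤ 0 ∨ 2 ≤ ace_values.length
instance (ace_count : Int) (ace_values : List Int) : Decidable (Pre_calculate_ace_values_py ace_count ace_values) := by unfold Pre_calculate_ace_values_py; infer_instance

def pvWitness_calculate_ace_values_py : Int × List Int := (3, [1, 11])

def Spec_calculate_ace_values_py (ace_count : Int) (ace_values : List Int) (out : List Int) : Prop := out = calculate_ace_values_py_alt ace_count ace_values
instance (ace_count : Int) (ace_values : List Int) (out : List Int) : Decidable (Spec_calculate_ace_values_py ace_count ace_values out) := by unfold Spec_calculate_ace_values_py; infer_instance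

-- ===== CLAIM (what is proved, stated in full; the proofs are below) =====
def Claim_equal_calculate_ace_values_py : Prop := ∀ (ace_count : Int) (ace_values : List Int), Dom_calculate_ace_values_py ace_count ace_values → Pre_calculate_ace_values_py ace_count ace_values → Spec_calculate_ace_values_py ace_count ace_values (calculate_ace_values_py ace_count ace_values)

-- ===== LEMMAS AND PROOFS =====

-- A loop whose body ignores the loop variable is an iterate of the body.
lemma foldl_const_iterate {α β : Type} (f : β → β) (l : List α) (init : β) :
    l.foldl (fun acc _ => f acc) init = f^[l.length] init := by
  induction l generalizing init with
  | nil => rfl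
  | cons x xs ih => simp [List.foldl_cons, ih, Function.iterate_succ_apply]

-- A's loop body for fixed ace values.
def aceStep (v0 v1 : Int) (acc : List Int) : List Int :=
  PySem.List.sorted
    (PySem.Set.ofList (acc.map (fun e => v0 + e) ++ acc.map (fun e => v1 + e)))
    (fun x => x) false

-- Invariant of A's loop: after n iterations the state is strictly increasing and
-- holds exactly the totals v0*k + v1*(n-k), 0 ≤ k ≤ n.
lemma aceStep_iterate_inv (v0 v1 : Int) (n : Nat) :
    ((aceStep v0 v1)^[n] [0]).Pairwise (· < ·) ∧
    ∀ x, x ∈ (aceStep v0 v1)^[n] [0] ↔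
      ∃ k : Nat, k ≤ n ∧ x = v0 * (k : Int) + v1 * ((n : Int) - (k : Int)) := by
  induction n with
  | zero =>
    constructor
    · simp
    · intro x
      simp only [Function.iterate_zero, id_eq, List.mem_singleton]
      constructor
      · intro hx; exact ⟨0, Nat.le_refl 0, by simp [hx]⟩
      · rintro ⟨k, hk, rfl⟩; interval_cases k; simp
  | succ n ih =>
    rw [Function.iterate_succ_apply']
    constructor
    · exact PySem.List.sorted_ofList_pairwise_lt _
    · intro x
      rw [aceStep, PySem.List.mem_sorted, PySem.Set.mem_ofList, List.mem_append]
      simp only [List.mem_map]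
      constructor
      · rintro (⟨e, he, rfl⟩ | ⟨e, he, rfl⟩)
        · obtain ⟨k, hk, rfl⟩ := (ih.2 e).1 he
          exact ⟨k + 1, by omega, by push_cast; ring⟩
        · obtain ⟨k, hk, rfl⟩ := (ih.2 e).1 he
          exact ⟨k, by omega, by push_cast; ring⟩
      · rintro ⟨k, hk, rfl⟩
        by_cases h0 : k = 0
        · subst h0
          right
          exact ⟨v0 * 0 + v1 * ((n : Int) - 0), (ih.2 _).2 ⟨0, by omega, rfl⟩,
            by push_cast; ring⟩
        · left
          refine ⟨v0 * ((k - 1 : Nat) : Int) + v1 * ((n : Int) - ((k - 1 : Nat) : Int)),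
            (ih.2 _).2 ⟨k - 1, by omega, rfl⟩, ?_⟩
          have : ((k - 1 : Nat) : Int) = (k : Int) - 1 := by omega
          rw [this]; push_cast; ring

-- Two strictly increasing lists with the same members are equal.
lemma eq_of_pairwise_lt_of_mem_iff (l₁ l₂ : List Int)
    (h₁ : l₁.Pairwise (· < ·)) (h₂ : l₂.Pairwise (· < ·))
    (h : ∀ x, x ∈ l₁ ↔ x ∈ l₂) : l₁ = l₂ := by
  have hp : l₁.Perm l₂ :=
    (List.perm_ext_iff_of_nodup h₁.nodup h₂.nodup).2 h
  exact hp.eq_of_pairwise (fun _ _ _ _ hab hba => absurd hba (lt_asymm hab)) h₁ h₂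

-- Membership of B's list: exactly the totals v0*k + v1*(n-k), 0 ≤ k ≤ n.
lemma mem_alt_list (v0 v1 n : Int) (hn : 0 ≤ n) (x : Int) :
    (x ∈ PySem.List.sorted
      (PySem.Set.ofList ((PySem.List.pyRange 0 (n + 1) 1).map
        (fun k => v0 * k + v1 * (n - k)))) (fun x => x) false) ↔
    ∃ k : Nat, k ≤ n.toNat ∧ x = v0 * (k : Int) + v1 * (n - (k : Int)) := by
  rw [PySem.List.mem_sorted, PySem.Set.mem_ofList]
  simp only [List.mem_map, PySem.List.mem_pyRange_one]
  constructor
  · rintro ⟨j, ⟨hj0, hj1⟩, rfl⟩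
    exact ⟨j.toNat, by omega, by rw [Int.toNat_of_nonneg hj0]⟩
  · rintro ⟨k, hk, rfl⟩
    exact ⟨(k : Int), by omega, rfl⟩

-- ===== VERDICT (by name: the statement is the Claim_ definition above) =====
theorem calculate_ace_values_py_spec : Claim_equal_calculate_ace_values_py := by
  intro n vs _ hpre
  unfold Spec_calculate_ace_values_py calculate_ace_values_py calculate_ace_values_py_alt
  by_cases hn : n ≤ 0
  · rw [PySem.List.pyRange_one_eq_nil (by omega)]
    simp [hn]
  · replace hn : 0 < n := by omega
    have hlen : 2 ≤ vs.length := by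
      rcases hpre with h | h
      · omega
      · exact h
    obtain ⟨a, b, rest, rfl⟩ : ∃ a b rest, vs = a :: b :: rest := by
      match vs, hlen with
      | a :: b :: rest, _ => exact ⟨a, b, rest, rfl⟩
    have hg0 : PySem.List.pyGet? (a :: b :: rest) 0 = some a :=
      PySem.List.pyGet?_zero_cons a (b :: rest)
    have hg1 : PySem.List.pyGet? (a :: b :: rest) 1 = some b := by
      simp [PySem.List.pyGet?, PySem.List.pyIdx?]
    have hnle : ¬ n ≤ 0 := by omega
    simp only [hg0, hg1, hnle, if_false]
    rw [show (fun (acc : List Int) (_ : Int) =>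
        PySem.List.sorted
          (PySem.Set.ofList (acc.map (fun e => a + e) ++ acc.map (fun e => b + e)))
          (fun x => x) false) = (fun acc _ => aceStep a b acc) from rfl]
    rw [foldl_const_iterate, PySem.List.length_pyRange_one]
    have hnn : ((n - 0).toNat : Int) = n := by omega
    obtain ⟨hpw, hmem⟩ := aceStep_iterate_inv a b (n - 0).toNat
    refine eq_of_pairwise_lt_of_mem_iff _ _ hpw
      (PySem.List.sorted_ofList_pairwise_lt _) ?_
    intro x
    rw [hmem x, mem_alt_list a b n (by omega) x]
    constructor
    · rintro ⟨k, hk, rfl⟩; exact ⟨k, by omega, by rw [hnn]⟩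
    · rintro ⟨k, hk, rfl⟩; exact ⟨k, by omega, by rw [hnn]⟩
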